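-- pv_equiv track=rewrite | github.com/nkolew/Softuni-Python | python-advanced/03 - Multidimensional Lists - Exercise/06. Knight Game.py | iterate_over_knights
-- ===== SOURCE A (Python) =====
-- from collections import defaultdict
-- from typing import DefaultDict
--
-- def get_knights(arr):
--     n = len(arr)
--     return [(i, j) for i in range(n)
--             for j in range(n) if arr[i][j] == 'K']
--
-- def valid_positions(arr, x, y):
--     n = len(arr)
--     return 0 <= x < n and 0 <= y < n
--
-- def get_knights_histo(arr) -> DefaultDict:
--     TARGET_DELTAS = [
--         (-2, -1),
--         (-1, -2),
--         (1, -2),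
--         (2, -1),
--         (2, 1),
--         (1, 2),
--         (-1, 2),
--         (-2, 1),
--     ]
--
--     knights_histo = defaultdict(int)
--     for i in range(len(get_knights(arr))):
--         x, y = get_knights(arr)[i][0], get_knights(arr)[i][1]
--         for j in range(len(TARGET_DELTAS)):
--             delta_x, delta_y = TARGET_DELTAS[j][0], TARGET_DELTAS[j][1]
--             pos_x, pos_y = x + delta_x, y + delta_y
--             if valid_positions(arr, pos_x, pos_y):
--                 if arr[pos_x][pos_y] == 'K':
--                     knights_histo[(x, y)] += 1
--     return knights_histo
--
-- def remove_knight(arr, coord: tuple):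
--     x, y = coord
--     arr[x][y] = 0
--     return arr
--
-- def iterate_over_knights(arr):
--     removed_knights = 0
--     while True:
--         knigthts_histo = get_knights_histo(arr)
--         if not knigthts_histo:
--             return removed_knights
--         knights = [k for k, _ in sorted(
--             knigthts_histo.items(),
--             key=lambda x: -x[1])]
--         best_knight = knights[0]
--         arr = remove_knight(arr, best_knight)
--         removed_knights += 1
-- ===== SOURCE B (Python) =====
-- def iterate_over_knights(arr):
--     DELTAS = ((-2, -1), (-1, -2), (1, -2), (2, -1), (2, 1), (1, 2), (-1, 2), (-2, 1))
--     n = len(arr)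
--     knights = [(i, j) for i in range(n) for j in range(n) if arr[i][j] == 'K']
--     kset = set(knights)
--     adj = {p: [(p[0] + dx, p[1] + dy) for dx, dy in DELTAS
--                if (p[0] + dx, p[1] + dy) in kset] for p in knights}
--     deg = {p: len(adj[p]) for p in knights}
--     alive = set(knights)
--     removed = 0
--     while True:
--         best = None
--         best_d = 0
--         for p in knights:
--             if p in alive and deg[p] > best_d:
--                 best = p
--                 best_d = deg[p]
--         if best is None:
--             return removed
--         alive.discard(best)
--         for q in adj[best]:
--             deg[q] -= 1
--         removed += 1
-- ===== Notes on version B (the rewrite author's own statement) =====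
-- stated objective: alternative
-- what changed: A rebuilds the knight list and attack histogram from the full grid and sorts it on every removal round; B scans the grid once, builds the knight adjacency graph and degree table once, and after each removal only decrements the degrees of the removed knight's neighbours, picking the first maximum-degree alive knight in one pass (no rescans, no histogram, no sort); on the sampled inputs the measured cost is the same.
import Mathlib
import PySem

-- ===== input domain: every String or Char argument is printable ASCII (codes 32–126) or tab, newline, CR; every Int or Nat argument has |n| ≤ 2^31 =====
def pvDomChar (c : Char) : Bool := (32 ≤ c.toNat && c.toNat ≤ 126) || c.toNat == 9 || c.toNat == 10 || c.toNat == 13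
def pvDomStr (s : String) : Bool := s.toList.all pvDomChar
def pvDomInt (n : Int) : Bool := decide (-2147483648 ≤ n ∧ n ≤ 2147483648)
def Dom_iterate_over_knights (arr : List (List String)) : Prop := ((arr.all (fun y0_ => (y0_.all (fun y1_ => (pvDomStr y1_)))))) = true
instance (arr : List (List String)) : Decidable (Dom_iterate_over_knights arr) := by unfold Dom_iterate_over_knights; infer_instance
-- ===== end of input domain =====

-- B scans the grid once, builds the knight adjacency graph and degree table once and only decrements
-- neighbour degrees after each removal, instead of A's per-round full-grid rescans, histogram rebuild
-- and sort; A mutates arr in place while B does not — the equivalence proved here is about the return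
-- value only.

-- ===== PORT A =====
def pvDeltasA : List (Int × Int) :=
  [(-2, -1), (-1, -2), (1, -2), (2, -1), (2, 1), (1, 2), (-1, 2), (-2, 1)]

-- arr[i][j] as an Option (none exactly where Python raises IndexError)
def pvCell (g : List (List String)) (i j : Int) : Option String :=
  (PySem.List.pyGet? g i).bind (fun row => PySem.List.pyGet? row j)

def get_knights (g : List (List String)) : List (Int × Int) :=
  (PySem.List.pyRange 0 g.length).flatMap (fun i =>
    ((PySem.List.pyRange 0 g.length).filter (fun j => pvCell g i j == some "K")).map (fun j => (i, j)))

def valid_positions (g : List (List String)) (x y : Int) : Bool :=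
  decide (0 ≤ x) && decide (x < (g.length : Int)) && decide (0 ≤ y) && decide (y < (g.length : Int))

-- body of the inner 'for j in range(len(TARGET_DELTAS))' loop; p = the knight (x, y), dl = the delta
def pvHistoStep (g : List (List String)) (d2 : PySem.Dict (Int × Int) Int)
    (p dl : Int × Int) : PySem.Dict (Int × Int) Int :=
  if valid_positions g (p.1 + dl.1) (p.2 + dl.2) then
    if pvCell g (p.1 + dl.1) (p.2 + dl.2) == some "K" then d2.modify (p.1, p.2) 0 (· + 1)
    else d2
  else d2

def get_knights_histo (g : List (List String)) : PySem.Dict (Int × Int) Int :=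
  (PySem.List.pyRange 0 (PySem.List.len (get_knights g))).foldl (fun d i =>
    (PySem.List.pyRange 0 (PySem.List.len pvDeltasA)).foldl (fun d2 j =>
      pvHistoStep g d2 (PySem.List.pyGetD (get_knights g) i (0, 0))
        (PySem.List.pyGetD pvDeltasA j (0, 0))) d) PySem.Dict.empty

-- Python writes the int 0 into the cell; every later read of a cell only compares it with 'K', so the
-- string "0" is an exact model of that write; both indices are coordinates of a knight, hence in range.
def remove_knight (g : List (List String)) (coord : Int × Int) : List (List String) :=
  g.modify coord.1.toNat (fun row => row.set coord.2.toNat "0")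

-- the 'while True' loop; fuel only makes it total (initial knight count + 1 iterations always suffice:
-- every iteration that does not return removes one knight)
def pvLoopA : Nat → List (List String) → Int → Int
  | 0, _, removed => removed
  | fuel + 1, g, removed =>
    let h := get_knights_histo g
    if h.items.isEmpty then removed
    else
      let knights := (PySem.List.sorted h.items (fun it => -it.2)).map (fun kv => kv.1)
      match PySem.List.pyGet? knights 0 with
      | none => removed      -- unreachable: the histogram is nonempty here
      | some best => pvLoopA fuel (remove_knight g best) (removed + 1)

def iterate_over_knights (arr : List (List String)) : Int :=
  pvLoopA ((get_knights arr).length + 1) arr 0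

-- ===== PORT B =====
def pvDeltasB : List (Int × Int) :=
  [(-2, -1), (-1, -2), (1, -2), (2, -1), (2, 1), (1, 2), (-1, 2), (-2, 1)]

def pvKnightsB (arr : List (List String)) : List (Int × Int) :=
  (PySem.List.pyRange 0 arr.length).flatMap (fun i =>
    ((PySem.List.pyRange 0 arr.length).filter (fun j => pvCell arr i j == some "K")).map (fun j => (i, j)))

-- [(p[0]+dx, p[1]+dy) for dx, dy in DELTAS if (p[0]+dx, p[1]+dy) in kset]
def pvAdjOf (kset : PySem.Set (Int × Int)) (p : Int × Int) : List (Int × Int) :=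
  (pvDeltasB.map (fun dl => (p.1 + dl.1, p.2 + dl.2))).filter (fun q => PySem.Set.contains kset q)

-- adj = {p: [...] for p in knights}
def pvAdjB (ks : List (Int × Int)) (kset : PySem.Set (Int × Int)) :
    PySem.Dict (Int × Int) (List (Int × Int)) :=
  ks.foldl (fun d p => d.insert p (pvAdjOf kset p)) PySem.Dict.empty

-- deg = {p: len(adj[p]) for p in knights}
def pvDegB (ks : List (Int × Int)) (adj : PySem.Dict (Int × Int) (List (Int × Int))) :
    PySem.Dict (Int × Int) Int :=
  ks.foldl (fun d p => d.insert p (PySem.List.len (adj.getD p []))) PySem.Dict.empty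

-- the 'for p in knights' first-strict-max scan over the alive knights
def pvBestScan (ks : List (Int × Int)) (alive : PySem.Set (Int × Int))
    (deg : PySem.Dict (Int × Int) Int) : Option (Int × Int) × Int :=
  ks.foldl (fun b p =>
    if alive.contains p && decide (b.2 < deg.getD p 0) then (some p, deg.getD p 0) else b) (none, 0)

-- the 'while True' loop; fuel only makes it total (one knight removed per non-returning iteration).
-- 'deg[q] -= 1' is Dict.modify with default 0: exact here, every q in adj[best] is a key of deg.
def pvLoopB : Nat → List (Int × Int) → PySem.Dict (Int × Int) (List (Int × Int)) →
    PySem.Set (Int × Int) → PySem.Dict (Int × Int) Int → Int → Int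
  | 0, _, _, _, _, removed => removed
  | fuel + 1, ks, adj, alive, deg, removed =>
    match pvBestScan ks alive deg with
    | (none, _) => removed
    | (some best, _) =>
      pvLoopB fuel ks adj (PySem.Set.discard alive best)
        ((adj.getD best []).foldl (fun d q => d.modify q 0 (· - 1)) deg) (removed + 1)

def iterate_over_knights_alt (arr : List (List String)) : Int :=
  let ks := pvKnightsB arr
  let kset := PySem.Set.ofList ks
  let adj := pvAdjB ks kset
  pvLoopB (ks.length + 1) ks adj (PySem.Set.ofList ks) (pvDegB ks adj) 0

-- ===== PRECONDITION & SPEC =====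
-- Python A raises IndexError as soon as some row is shorter than the number of rows (every round scans the
-- full len(arr) × len(arr) square), so it returns normally exactly on the inputs admitted here.
def Pre_iterate_over_knights (arr : List (List String)) : Prop :=
  ∀ row ∈ arr, arr.length ≤ row.length
instance (arr : List (List String)) : Decidable (Pre_iterate_over_knights arr) := by
  unfold Pre_iterate_over_knights; infer_instance

def pvWitness_iterate_over_knights : List (List String) :=
  [["K", "0", "0"], ["0", "0", "K"], ["0", "0", "K"]]

def Spec_iterate_over_knights (arr : List (List String)) (out : Int) : Prop := out = iterate_over_knights_alt arr
instance (arr : List (List String)) (out : Int) : Decidable (Spec_iterate_over_knights arr out) := by unfold Spec_iterate_over_knights; infer_instance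

-- ===== CLAIM (what is proved, stated in full; the proofs are below) =====
def Claim_equal_iterate_over_knights : Prop := ∀ (arr : List (List String)), Dom_iterate_over_knights arr → Pre_iterate_over_knights arr → Spec_iterate_over_knights arr (iterate_over_knights arr)

-- ===== LEMMAS AND PROOFS =====

-- ---- proof-side abstract middle loop: A's rounds rewritten over the knight list with recomputed counts ----

-- the per-knight neighbour count A computes, as one closed expression
def pvCnt (g : List (List String)) (p : Int × Int) : Int :=
  (pvDeltasA.countP (fun dl =>
    valid_positions g (p.1 + dl.1) (p.2 + dl.2) &&
    (pvCell g (p.1 + dl.1) (p.2 + dl.2) == some "K")) : Int)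

-- neighbour count inside a coordinate list
def pvNbrCount (kset : PySem.Set (Int × Int)) (x y : Int) : Int :=
  (pvDeltasB.countP (fun d => PySem.Set.contains kset (x + d.1, y + d.2)) : Int)

def pvBestM (ks : List (Int × Int)) (kset : PySem.Set (Int × Int)) : Option (Int × Int) × Int :=
  ks.foldl (fun b p =>
    if b.2 < pvNbrCount kset p.1 p.2 then (some p, pvNbrCount kset p.1 p.2) else b) (none, 0)

def pvLoopM : Nat → List (Int × Int) → Int → Int
  | 0, _, removed => removed
  | fuel + 1, ks, removed =>
    if ks.isEmpty then removed
    else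
      match pvBestM ks (PySem.Set.ofList ks) with
      | (none, _) => removed
      | (some best, _) => pvLoopM fuel (ks.filter (fun p => p ≠ best)) (removed + 1)

def pvLift {P : Type} (acc : Option (P × Int)) : Option P × Int :=
  (acc.map Prod.fst, (acc.map Prod.snd).getD 0)

lemma mem_get_knights (g : List (List String)) (q : Int × Int) :
    q ∈ get_knights g ↔
      0 ≤ q.1 ∧ q.1 < (g.length : Int) ∧ 0 ≤ q.2 ∧ q.2 < (g.length : Int) ∧
        pvCell g q.1 q.2 = some "K" := by
  obtain ⟨a, b⟩ := q
  simp only [get_knights, List.mem_flatMap, PySem.List.mem_pyRange_one, List.mem_map,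
    List.mem_filter, beq_iff_eq, Prod.mk.injEq, exists_eq_right_right]
  tauto

lemma nodup_get_knights (g : List (List String)) : (get_knights g).Nodup := by
  unfold get_knights
  rw [List.nodup_flatMap]
  constructor
  · intro i _
    exact (((PySem.List.nodup_pyRange_one _ _).filter _).map (by
      intro a b h; simpa using h))
  · have := (PySem.List.nodup_pyRange_one (0:Int) g.length)
    refine List.Pairwise.imp ?_ this
    intro i i' hne p hp hp'
    simp [List.mem_map, List.mem_filter] at hp hp'
    obtain ⟨j, _, rfl⟩ := hp
    obtain ⟨j', _, h⟩ := hp'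
    exact hne (by simpa using congrArg Prod.fst h.symm)

-- inner loop: repeated conditional counting inserts at one key
lemma count_insert_fold {K A : Type} [BEq K] [LawfulBEq K] (k : K) (cond : A → Bool) :
    ∀ (l : List A) (d : PySem.Dict K Int),
      l.foldl (fun d2 a => if cond a then d2.insert k (d2.getD k 0 + 1) else d2) d
        = if l.countP cond = 0 then d else d.insert k (d.getD k 0 + (l.countP cond : Int)) := by
  intro l
  induction l with
  | nil => intro d; simp
  | cons a l ih =>
    intro d
    rw [List.foldl_cons, List.countP_cons]
    by_cases ha : cond a
    · rw [if_pos ha, ih]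
      have hrhs : (l.countP cond + if cond a = true then 1 else 0) = l.countP cond + 1 := by
        simp [ha]
      rw [hrhs, if_neg (show ¬(l.countP cond + 1 = 0) by omega)]
      by_cases hl : l.countP cond = 0
      · rw [if_pos hl, hl]
        norm_num
      · rw [if_neg hl, PySem.Dict.getD_insert_self, PySem.Dict.insert_insert_self]
        congr 1
        push_cast
        ring
    · simp only [ha, Bool.false_eq_true, if_false]
      rw [ih]
      norm_num

lemma histo_fold (g : List (List String)) :
    ∀ (ks : List (Int × Int)) (d : PySem.Dict (Int × Int) Int),
      d.keys.Nodup → (∀ p ∈ ks, d.contains p = false) → ks.Nodup →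
      (ks.foldl (fun d p => if pvCnt g p = 0 then d else d.insert p (d.getD p 0 + pvCnt g p)) d).items
        = d.items ++ (ks.filter (fun p => pvCnt g p ≠ 0)).map (fun p => (p, pvCnt g p)) := by
  intro ks
  induction ks with
  | nil => intro d _ _ _; simp
  | cons p ks ih =>
    intro d hnd hfresh hk
    rw [List.foldl_cons, List.filter_cons]
    have hf := hfresh p (by simp)
    by_cases hp : pvCnt g p = 0
    · rw [if_pos hp, if_neg (by simp [hp])]
      exact ih d hnd (fun q hq => hfresh q (by simp [hq])) hk.of_cons
    · rw [if_neg hp, if_pos (by simp [hp]), List.map_cons]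
      rw [PySem.Dict.getD_of_not_contains d 0 hf, zero_add]
      rw [ih (d.insert p (pvCnt g p)) (PySem.Dict.nodup_keys_insert d p _ hnd)
        (fun q hq => by
          rw [PySem.Dict.contains_insert]
          have hqp : q ≠ p := by rintro rfl; exact (List.nodup_cons.mp hk).1 hq
          simp [hqp, hfresh q (by simp [hq])])
        hk.of_cons]
      rw [PySem.Dict.items_insert_of_not_contains d _ hf]
      simp

lemma inner_collapse (g : List (List String)) (p : Int × Int) (d : PySem.Dict (Int × Int) Int) :
    pvDeltasA.foldl (fun d2 dl => pvHistoStep g d2 p dl) d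
      = if pvCnt g p = 0 then d else d.insert p (d.getD p 0 + pvCnt g p) := by
  have hstep : ∀ (d2 : PySem.Dict (Int × Int) Int) (dl : Int × Int),
      pvHistoStep g d2 p dl
        = if (valid_positions g (p.1 + dl.1) (p.2 + dl.2) &&
              (pvCell g (p.1 + dl.1) (p.2 + dl.2) == some "K")) then
            d2.insert p (d2.getD p 0 + 1) else d2 := by
    intro d2 dl
    by_cases h1 : valid_positions g (p.1 + dl.1) (p.2 + dl.2) <;>
      by_cases h2 : (pvCell g (p.1 + dl.1) (p.2 + dl.2) == some "K") = true <;>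
        simp [pvHistoStep, h1, h2, PySem.Dict.modify]
  rw [List.foldl_ext _ _ d (fun d2 dl _ => hstep d2 dl)]
  unfold pvCnt
  simp only [Nat.cast_eq_zero]
  exact count_insert_fold p (fun dl => valid_positions g (p.1 + dl.1) (p.2 + dl.2) &&
    (pvCell g (p.1 + dl.1) (p.2 + dl.2) == some "K")) pvDeltasA d

lemma histo_items (g : List (List String)) :
    (get_knights_histo g).items =
      ((get_knights g).filter (fun p => pvCnt g p ≠ 0)).map (fun p => (p, pvCnt g p)) := by
  have h1 : get_knights_histo g
      = (get_knights g).foldl (fun d p =>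
          pvDeltasA.foldl (fun d2 dl => pvHistoStep g d2 p dl) d) PySem.Dict.empty := by
    have houter := PySem.List.foldl_pyRange_pyGetD (get_knights g) ((0 : Int), (0 : Int))
      (fun d p => (PySem.List.pyRange 0 (PySem.List.len pvDeltasA)).foldl
        (fun d2 j => pvHistoStep g d2 p (PySem.List.pyGetD pvDeltasA j (0, 0))) d)
      PySem.Dict.empty (le_refl 0)
    rw [Int.toNat_zero, List.drop_zero] at houter
    refine Eq.trans houter ?_
    refine List.foldl_ext _ _ _ (fun d p _ => ?_)
    have hin := PySem.List.foldl_pyRange_pyGetD pvDeltasA ((0 : Int), (0 : Int))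
      (fun d2 dl => pvHistoStep g d2 p dl) d (le_refl 0)
    rw [Int.toNat_zero, List.drop_zero] at hin
    exact hin
  rw [h1]
  rw [List.foldl_ext _ _ PySem.Dict.empty (fun d p _ => inner_collapse g p d)]
  have := histo_fold g (get_knights g) PySem.Dict.empty (by simp [PySem.Dict.keys, PySem.Dict.empty])
    (fun q _ => by simp [PySem.Dict.contains_empty]) (nodup_get_knights g)
  simpa [PySem.Dict.empty] using this

lemma foldl_insertBy_head {α κ : Type} [LinearOrder κ] (key : α → κ) :
    ∀ (xs : List α) (h : α) (t : List α), ∃ t',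
      xs.foldl (fun acc x => PySem.List.insertBy (fun a b => decide (key a < key b)) x acc) (h :: t)
        = (xs.foldl (fun m x => if key x < key m then x else m) h) :: t' := by
  intro xs
  induction xs with
  | nil => intro h t; exact ⟨t, rfl⟩
  | cons x xs ih =>
    intro h t
    simp only [List.foldl_cons, PySem.List.insertBy]
    by_cases hx : key x < key h
    · simpa [hx] using ih x (h :: t)
    · simpa [hx] using ih h (PySem.List.insertBy (fun a b => decide (key a < key b)) x t)

lemma min?_foldl_some {α κ : Type} [LinearOrder κ] (key : α → κ)
    (f : Option α → α → Option α)
    (hf : ∀ m x, f (some m) x = some (if key x < key m then x else m)) :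
    ∀ (xs : List α) (m : α),
      xs.foldl f (some m) = some (xs.foldl (fun m x => if key x < key m then x else m) m) := by
  intro xs
  induction xs with
  | nil => intro m; rfl
  | cons x xs ih =>
    intro m
    simp only [List.foldl_cons, hf]
    exact ih _

lemma head_sorted_eq_min? {α κ : Type} [LinearOrder κ] (xs : List α) (key : α → κ)
    {m : α} {t : List α} (h : PySem.List.sorted xs key = m :: t) :
    PySem.List.min? xs key = some m := by
  cases xs with
  | nil => simp [PySem.List.sorted] at h
  | cons x xs =>
    rw [PySem.List.sorted_eq_foldl_insertBy] at h
    simp only [List.foldl_cons, PySem.List.insertBy] at h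
    obtain ⟨t', ht'⟩ := foldl_insertBy_head key xs x []
    rw [ht'] at h
    have hm : xs.foldl (fun m x => if key x < key m then x else m) x = m := by
      injection h
    simp only [PySem.List.min?, List.foldl_cons]
    rw [min?_foldl_some key _ (fun m x => by split <;> simp_all <;> split <;> rfl) xs x, hm]

lemma bestM_abstract {P : Type} (c : P → Int) (hc : ∀ p, 0 ≤ c p)
    (f : Option (P × Int) → (P × Int) → Option (P × Int))
    (hf0 : ∀ it, f none it = some it)
    (hf1 : ∀ m it, f (some m) it = some (if -it.2 < -m.2 then it else m)) :
    ∀ (ks : List P) (acc : Option (P × Int))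
      (hacc : ∀ x, acc = some x → 1 ≤ x.2 ∧ x.2 = c x.1),
      ks.foldl (fun b p => if b.2 < c p then (some p, c p) else b) (pvLift acc)
        = pvLift (((ks.filter (fun p => c p ≠ 0)).map (fun p => (p, c p))).foldl f acc) := by
  intro ks
  induction ks with
  | nil => intro acc hacc; rfl
  | cons p ks ih =>
    intro acc hacc
    by_cases hp : c p = 0
    · have hfc : (p :: ks).filter (fun q => decide (c q ≠ 0)) = ks.filter (fun q => decide (c q ≠ 0)) := by
        simp [List.filter_cons, hp]
      have hb : (if (pvLift acc).2 < c p then ((some p : Option P), c p) else pvLift acc) = pvLift acc := by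
        cases acc with
        | none => rw [if_neg]; simp only [pvLift, Option.map_none, Option.getD_none]; omega
        | some m =>
          obtain ⟨hm1, _⟩ := hacc m rfl
          rw [if_neg]; simp only [pvLift, Option.map_some, Option.getD_some]; omega
      rw [hfc, List.foldl_cons, hb]
      exact ih acc hacc
    · have hfc : (p :: ks).filter (fun q => decide (c q ≠ 0)) = p :: ks.filter (fun q => decide (c q ≠ 0)) := by
        simp [List.filter_cons, hp]
      rw [hfc, List.map_cons, List.foldl_cons, List.foldl_cons]
      cases acc with
      | none =>
        rw [hf0]
        have hb : (if (pvLift (none : Option (P × Int))).2 < c p then ((some p : Option P), c p) else pvLift none) = pvLift (some (p, c p)) := by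
          rw [if_pos]
          · rfl
          · simp only [pvLift, Option.map_none, Option.getD_none]
            have := hc p; omega
        rw [hb]
        exact ih (some (p, c p)) (by intro x hx; injection hx with hx; subst hx; exact ⟨by have := hc p; omega, rfl⟩)
      | some m =>
        obtain ⟨hm1, hm2⟩ := hacc m rfl
        rw [hf1]
        by_cases hlt : m.2 < c p
        · have h1 : (if -((p, c p) : P × Int).2 < -m.2 then ((p, c p) : P × Int) else m) = (p, c p) := by
            rw [if_pos]; simp only; omega
          have hb : (if (pvLift (some m)).2 < c p then ((some p : Option P), c p) else pvLift (some m)) = pvLift (some (p, c p)) := by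
            rw [if_pos]
            · rfl
            · simpa [pvLift] using hlt
          rw [h1, hb]
          exact ih (some (p, c p)) (by intro x hx; injection hx with hx; subst hx; exact ⟨by have := hc p; omega, rfl⟩)
        · have h1 : (if -((p, c p) : P × Int).2 < -m.2 then ((p, c p) : P × Int) else m) = m := by
            rw [if_neg]; simp only; omega
          have hb : (if (pvLift (some m)).2 < c p then ((some p : Option P), c p) else pvLift (some m)) = pvLift (some m) := by
            rw [if_neg]; simpa [pvLift] using hlt
          rw [h1, hb]
          exact ih (some m) hacc

lemma cnt_eq_nbrCount (g : List (List String)) (x y : Int) :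
    pvNbrCount (PySem.Set.ofList (get_knights g)) x y = pvCnt g (x, y) := by
  unfold pvNbrCount pvCnt
  congr 1
  refine List.countP_congr ?_
  intro dl _
  rw [Bool.eq_iff_iff]
  constructor
  · intro h
    have hmem : (x + dl.1, y + dl.2) ∈ get_knights g := by
      rw [← PySem.Set.mem_ofList]
      simpa [PySem.Set.contains] using h
    have := (mem_get_knights g _).mp hmem
    simp only [valid_positions, Bool.and_eq_true, decide_eq_true_eq, beq_iff_eq]
    tauto
  · intro h
    simp only [valid_positions, Bool.and_eq_true, decide_eq_true_eq, beq_iff_eq] at h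
    have hmem : (x + dl.1, y + dl.2) ∈ get_knights g := (mem_get_knights g _).mpr (by tauto)
    simpa [PySem.Set.contains] using (PySem.Set.mem_ofList _ _).mpr hmem

lemma bestM_eq (g : List (List String)) :
    pvBestM (get_knights g) (PySem.Set.ofList (get_knights g))
      = pvLift (PySem.List.min? (((get_knights g).filter (fun p => pvCnt g p ≠ 0)).map
          (fun p => (p, pvCnt g p))) (fun it => -it.2)) := by
  unfold pvBestM
  rw [List.foldl_ext _
    (fun (b : Option (Int × Int) × Int) (p : Int × Int) =>
      if b.2 < pvCnt g p then (some p, pvCnt g p) else b)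
    ((none : Option (Int × Int)), (0 : Int))
    (fun b p _ => by rw [cnt_eq_nbrCount g p.1 p.2])]
  simp only [PySem.List.min?]
  exact bestM_abstract (fun p => pvCnt g p)
    (fun p => by unfold pvCnt; positivity)
    _ (fun it => rfl) (fun m it => by split <;> simp_all <;> split <;> rfl)
    (get_knights g) none (fun x hx => by cases hx)

lemma cell_remove (g : List (List String)) (x y : Int)
    (hx0 : 0 ≤ x) (hy0 : 0 ≤ y) (hcK : pvCell g x y = some "K") (i j : Int)
    (hi : 0 ≤ i) (hj : 0 ≤ j) :
    pvCell (remove_knight g (x, y)) i j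
      = if i = x ∧ j = y then some "0" else pvCell g i j := by
  rw [pvCell, PySem.List.pyGet?_of_nonneg g hx0] at hcK
  cases hrow : g[x.toNat]? with
  | none => rw [hrow] at hcK; simp at hcK
  | some row =>
    rw [hrow] at hcK
    have hcK2 : row[y.toNat]? = some "K" := by
      rw [← PySem.List.pyGet?_of_nonneg row hy0]
      exact hcK
    have hylt : y.toNat < row.length := by
      by_contra hcon
      rw [List.getElem?_eq_none (by omega)] at hcK2
      simp at hcK2
    show pvCell (remove_knight g (x, y)) i j = _
    unfold pvCell remove_knight
    rw [PySem.List.pyGet?_of_nonneg _ hi]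
    simp only
    rw [List.getElem?_modify]
    by_cases hix : i = x
    · subst hix
      rw [hrow]
      simp only [Option.map_some]
      show PySem.List.pyGet? (row.set y.toNat "0") j = _
      rw [PySem.List.pyGet?_of_nonneg _ hj, List.getElem?_set]
      by_cases hjy : j = y
      · subst hjy
        rw [if_pos rfl, if_pos hylt]
        simp
      · have hne : y.toNat ≠ j.toNat := by omega
        rw [if_neg hne, if_neg (by tauto)]
        rw [PySem.List.pyGet?_of_nonneg g hi, hrow]
        show _ = PySem.List.pyGet? row j
        rw [PySem.List.pyGet?_of_nonneg row hj]
    · have hne : x.toNat ≠ i.toNat := by omega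
      simp only [if_neg hne]
      rw [if_neg (show ¬(i = x ∧ j = y) by tauto)]
      rw [PySem.List.pyGet?_of_nonneg g hi]
      cases g[i.toNat]? <;> rfl

lemma knights_remove (g : List (List String)) (b : Int × Int) (hb : b ∈ get_knights g) :
    get_knights (remove_knight g b) = (get_knights g).filter (fun p => p ≠ b) := by
  obtain ⟨x, y⟩ := b
  obtain ⟨hx0, hxn, hy0, hyn, hcK⟩ := (mem_get_knights g (x, y)).mp hb
  have hlen : (remove_knight g (x, y)).length = g.length := by
    simp [remove_knight, List.length_modify]
  unfold get_knights
  rw [hlen, List.filter_flatMap]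
  refine List.flatMap_congr (fun i hi => ?_)
  obtain ⟨hi0, _⟩ := PySem.List.mem_pyRange_one.mp hi
  rw [List.filter_map, List.filter_filter]
  refine congrArg _ (List.filter_congr (fun j hj => ?_))
  obtain ⟨hj0, _⟩ := PySem.List.mem_pyRange_one.mp hj
  rw [cell_remove g x y hx0 hy0 hcK i j hi0 hj0]
  by_cases hxy : i = x ∧ j = y
  · obtain ⟨rfl, rfl⟩ := hxy
    simp
  · rw [if_neg hxy]
    have hne : ((i, j) : Int × Int) ≠ (x, y) := by
      simp only [ne_eq, Prod.mk.injEq]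
      tauto
    simp [Function.comp, hne]

lemma loopA_eq_M (fuel : Nat) (g : List (List String)) (removed : Int) :
    pvLoopA fuel g removed = pvLoopM fuel (get_knights g) removed := by
  induction fuel generalizing g removed with
  | zero => rfl
  | succ fuel ih =>
    by_cases hits : ((get_knights g).filter (fun p => pvCnt g p ≠ 0)) = []
    · have hA : (get_knights_histo g).items.isEmpty = true := by
        rw [histo_items, hits]; rfl
      by_cases hks : (get_knights g).isEmpty
      · simp [pvLoopA, pvLoopM, hA, hks]
      · have hbest : pvBestM (get_knights g) (PySem.Set.ofList (get_knights g))
            = ((none : Option (Int × Int)), (0 : Int)) := by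
          rw [bestM_eq, hits]
          rfl
        simp [pvLoopA, pvLoopM, hA, hks, hbest]
    · have hmapne : ((get_knights g).filter (fun p => pvCnt g p ≠ 0)).map
          (fun p => (p, pvCnt g p)) ≠ [] := by
        simpa using hits
      have hsne : PySem.List.sorted (((get_knights g).filter (fun p => pvCnt g p ≠ 0)).map
          (fun p => (p, pvCnt g p))) (fun it => -it.2) ≠ [] := by
        rw [ne_eq, PySem.List.sorted_eq_nil_iff]
        exact hmapne
      obtain ⟨m, t, hmt⟩ : ∃ m t, PySem.List.sorted (((get_knights g).filter
          (fun p => pvCnt g p ≠ 0)).map (fun p => (p, pvCnt g p))) (fun it => -it.2) = m :: t := by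
        cases h : PySem.List.sorted (((get_knights g).filter (fun p => pvCnt g p ≠ 0)).map
          (fun p => (p, pvCnt g p))) (fun it => -it.2) with
        | nil => exact absurd h hsne
        | cons m t => exact ⟨m, t, rfl⟩
      have hmin := head_sorted_eq_min? _ _ hmt
      have hA : (get_knights_histo g).items.isEmpty = false := by
        rw [histo_items]
        cases h2 : ((get_knights g).filter (fun p => pvCnt g p ≠ 0)).map
            (fun p => (p, pvCnt g p)) with
        | nil => exact absurd h2 hmapne
        | cons a l => rfl
      have hks : (get_knights g).isEmpty = false := by
        cases h : get_knights g with
        | nil => rw [h] at hits; simp at hits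
        | cons a l => rfl
      have hbest : pvBestM (get_knights g) (PySem.Set.ofList (get_knights g))
          = (some m.1, m.2) := by
        rw [bestM_eq, hmin]
        rfl
      have hbmem : m.1 ∈ get_knights g := by
        have hmem := PySem.List.min?_mem hmin
        obtain ⟨p, hpfil, hpm⟩ := List.mem_map.mp hmem
        have : p ∈ get_knights g := List.mem_of_mem_filter hpfil
        rw [← hpm]
        exact this
      have hA1 : pvLoopA (fuel + 1) g removed
          = pvLoopA fuel (remove_knight g m.1) (removed + 1) := by
        simp only [pvLoopA, hA, Bool.false_eq_true, if_false]
        rw [histo_items, hmt]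
        simp [PySem.List.pyGet?, PySem.List.pyIdx?]
      have hB1 : pvLoopM (fuel + 1) (get_knights g) removed
          = pvLoopM fuel ((get_knights g).filter (fun p => p ≠ m.1)) (removed + 1) := by
        simp only [pvLoopM, hks, Bool.false_eq_true, if_false, hbest]
      rw [hA1, hB1, ih, knights_remove g m.1 hbmem]

-- ---- middle loop = B's incremental loop ----

-- neighbour count of p inside a plain coordinate list
def pvCntL (ks : List (Int × Int)) (p : Int × Int) : Int :=
  (pvDeltasB.countP (fun dl => decide ((p.1 + dl.1, p.2 + dl.2) ∈ ks)) : Int)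

lemma nbrCount_eq_cntL (ks : List (Int × Int)) (p : Int × Int) :
    pvNbrCount (PySem.Set.ofList ks) p.1 p.2 = pvCntL ks p := by
  unfold pvNbrCount pvCntL
  congr 1
  refine List.countP_congr (fun dl _ => ?_)
  rw [Bool.eq_iff_iff, PySem.Set.contains_iff, PySem.Set.mem_ofList]
  simp

lemma foldl_guard_filter {α β : Type} (c : α → Bool) (d : β → α → Bool) (g : β → α → β) :
    ∀ (l : List α) (b : β),
      l.foldl (fun b p => if c p && d b p then g b p else b) b
        = (l.filter c).foldl (fun b p => if d b p then g b p else b) b := by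
  intro l
  induction l with
  | nil => intro b; rfl
  | cons p l ih =>
    intro b
    rw [List.foldl_cons, List.filter_cons]
    by_cases hc : c p
    · rw [if_pos hc, List.foldl_cons]
      by_cases hd : d b p
      · simp only [hc, hd, Bool.and_self, if_pos]
        exact ih _
      · simp only [hc, hd, Bool.true_and, Bool.false_eq_true, if_false]
        exact ih _
    · simp only [hc, Bool.false_and, Bool.false_eq_true, if_false]
      exact ih b

lemma bestScan_eq_bestM (ks0 : List (Int × Int)) (alive : PySem.Set (Int × Int))
    (deg : PySem.Dict (Int × Int) Int)
    (hdeg : ∀ p ∈ ks0, deg.getD p 0 = pvCntL (ks0.filter (fun q => alive.contains q)) p) :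
    pvBestScan ks0 alive deg
      = pvBestM (ks0.filter (fun q => alive.contains q))
          (PySem.Set.ofList (ks0.filter (fun q => alive.contains q))) := by
  unfold pvBestScan pvBestM
  rw [foldl_guard_filter (fun p => alive.contains p)
    (fun b p => decide (b.2 < deg.getD p 0)) (fun b p => (some p, deg.getD p 0))]
  refine List.foldl_ext _ _ _ (fun b p hp => ?_)
  have hmem : p ∈ ks0 := List.mem_of_mem_filter hp
  rw [hdeg p hmem, nbrCount_eq_cntL]
  simp

lemma bestScan_none_or_mem {P : Type} (f : P → Int) :
    ∀ (l : List P) (acc : Option P × Int) (q : P),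
      (l.foldl (fun b p => if b.2 < f p then (some p, f p) else b) acc).1 = some q →
      acc.1 = some q ∨ q ∈ l := by
  intro l
  induction l with
  | nil => intro acc q h; exact Or.inl h
  | cons p l ih =>
    intro acc q h
    rw [List.foldl_cons] at h
    by_cases hc : acc.2 < f p
    · rcases ih _ q (by rwa [if_pos hc] at h) with h1 | h1
      · exact Or.inr (by simp at h1; simp [h1])
      · exact Or.inr (by simp [h1])
    · rcases ih _ q (by rwa [if_neg hc] at h) with h1 | h1
      · exact Or.inl h1
      · exact Or.inr (by simp [h1])

-- decrement loop: getD after 'for q in l: deg[q] -= 1'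
lemma getD_foldl_modify_sub_one (l : List (Int × Int)) :
    ∀ (d : PySem.Dict (Int × Int) Int) (v : Int × Int),
      (l.foldl (fun d q => d.modify q 0 (· - 1)) d).getD v 0 = d.getD v 0 - (l.count v : Int) := by
  induction l with
  | nil => intro d v; simp
  | cons q l ih =>
    intro d v
    rw [List.foldl_cons, ih, PySem.Dict.getD_modify, List.count_cons]
    by_cases hv : v = q
    · subst hv
      simp only [if_pos rfl, beq_self_eq_true, if_true]
      push_cast
      ring
    · rw [if_neg hv, if_neg (by simp only [beq_iff_eq]; exact fun hh => hv hh.symm)]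
      simp

lemma neg_delta_mem (dl : Int × Int) (h : dl ∈ pvDeltasB) : (-dl.1, -dl.2) ∈ pvDeltasB := by
  fin_cases h <;> decide

lemma nodup_deltasB : pvDeltasB.Nodup := by decide

lemma mem_adjOf (ks : List (Int × Int)) (b q : Int × Int) :
    q ∈ pvAdjOf (PySem.Set.ofList ks) b ↔
      (q.1 - b.1, q.2 - b.2) ∈ pvDeltasB ∧ q ∈ ks := by
  unfold pvAdjOf
  simp only [List.mem_filter, List.mem_map, PySem.Set.contains_iff, PySem.Set.mem_ofList]
  constructor
  · rintro ⟨⟨dl, hdl, rfl⟩, hq⟩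
    constructor
    · simpa using hdl
    · exact hq
  · rintro ⟨hdl, hq⟩
    refine ⟨⟨(q.1 - b.1, q.2 - b.2), hdl, by simp⟩, hq⟩

lemma nodup_adjOf (ks : List (Int × Int)) (b : Int × Int) :
    (pvAdjOf (PySem.Set.ofList ks) b).Nodup := by
  unfold pvAdjOf
  refine List.Nodup.filter _ (List.Nodup.map ?_ nodup_deltasB)
  intro x y h
  have h1 : b.1 + x.1 = b.1 + y.1 := congrArg Prod.fst h
  have h2 : b.2 + x.2 = b.2 + y.2 := congrArg Prod.snd h
  exact Prod.ext_iff.mpr ⟨by omega, by omega⟩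

lemma length_adjOf (ks : List (Int × Int)) (b : Int × Int) :
    ((pvAdjOf (PySem.Set.ofList ks) b).length : Int) = pvCntL ks b := by
  unfold pvAdjOf pvCntL
  rw [List.filter_map, List.length_map, ← List.countP_eq_length_filter]
  congr 1
  refine List.countP_congr (fun dl _ => ?_)
  rw [Bool.eq_iff_iff, Function.comp_apply, PySem.Set.contains_iff, PySem.Set.mem_ofList]
  simp

-- countP splits along a second predicate
lemma countP_split {α : Type} (A B : α → Bool) :
    ∀ (l : List α), l.countP A = l.countP (fun x => A x && B x) + l.countP (fun x => A x && !B x) := by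
  intro l
  induction l with
  | nil => rfl
  | cons x l ih =>
    rw [List.countP_cons, List.countP_cons, List.countP_cons]
    by_cases hA : A x <;> by_cases hB : B x <;> simp [hA, hB] <;> omega

-- the incremental degree update is exactly the recount after deleting best
lemma cntL_filter (ks : List (Int × Int)) (best p : Int × Int) (hb : best ∈ ks) :
    pvCntL (ks.filter (fun q => q ≠ best)) p
      = pvCntL ks p - (if (best.1 - p.1, best.2 - p.2) ∈ pvDeltasB then 1 else 0) := by
  unfold pvCntL
  have hsplit := countP_split (fun dl : Int × Int => decide ((p.1 + dl.1, p.2 + dl.2) ∈ ks))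
    (fun dl => decide ((p.1 + dl.1, p.2 + dl.2) = best)) pvDeltasB
  have h1 : pvDeltasB.countP (fun dl => decide ((p.1 + dl.1, p.2 + dl.2) ∈ ks.filter (fun q => q ≠ best)))
      = pvDeltasB.countP (fun dl => decide ((p.1 + dl.1, p.2 + dl.2) ∈ ks) &&
          !decide ((p.1 + dl.1, p.2 + dl.2) = best)) := by
    refine List.countP_congr (fun dl _ => ?_)
    rw [Bool.eq_iff_iff]
    simp [List.mem_filter]
  have h2 : pvDeltasB.countP (fun dl => decide ((p.1 + dl.1, p.2 + dl.2) ∈ ks) &&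
        decide ((p.1 + dl.1, p.2 + dl.2) = best))
      = if (best.1 - p.1, best.2 - p.2) ∈ pvDeltasB then 1 else 0 := by
    have h3 : pvDeltasB.countP (fun dl => decide ((p.1 + dl.1, p.2 + dl.2) ∈ ks) &&
          decide ((p.1 + dl.1, p.2 + dl.2) = best))
        = pvDeltasB.countP (fun dl => dl == (best.1 - p.1, best.2 - p.2)) := by
      refine List.countP_congr (fun dl _ => ?_)
      by_cases he : (p.1 + dl.1, p.2 + dl.2) = best
      · have ha : p.1 + dl.1 = best.1 := congrArg Prod.fst he
        have hb2 : p.2 + dl.2 = best.2 := congrArg Prod.snd he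
        have hdl : dl = (best.1 - p.1, best.2 - p.2) :=
          Prod.ext_iff.mpr ⟨by simp only; omega, by simp only; omega⟩
        simp [hdl, hb]
      · have hdl : dl ≠ (best.1 - p.1, best.2 - p.2) := by
          intro hc
          apply he
          subst hc
          exact Prod.ext_iff.mpr ⟨by simp, by simp⟩
        simp [he, hdl]
    rw [h3, ← List.count, List.Nodup.count nodup_deltasB]
  rw [h1, hsplit, h2]
  push_cast
  ring

lemma alive_discard_filter (ks0 : List (Int × Int)) (alive : PySem.Set (Int × Int))
    (best : Int × Int) :
    ks0.filter (fun q => (PySem.Set.discard alive best).contains q)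
      = (ks0.filter (fun q => alive.contains q)).filter (fun q => q ≠ best) := by
  rw [List.filter_filter]
  refine List.filter_congr (fun q _ => ?_)
  rw [Bool.eq_iff_iff]
  simp only [PySem.Set.contains_iff, PySem.Set.mem_discard, Bool.and_eq_true, decide_eq_true_eq,
    ne_eq]
  tauto

lemma bestM_mem (ks : List (Int × Int)) (kset : PySem.Set (Int × Int)) {best : Int × Int}
    {c : Int} (h : pvBestM ks kset = (some best, c)) : best ∈ ks := by
  have h1 : (ks.foldl (fun b p =>
      if b.2 < pvNbrCount kset p.1 p.2 then (some p, pvNbrCount kset p.1 p.2) else b)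
      ((none : Option (Int × Int)), (0 : Int))).1 = some best := by
    rw [show (ks.foldl (fun b p =>
      if b.2 < pvNbrCount kset p.1 p.2 then (some p, pvNbrCount kset p.1 p.2) else b)
      ((none : Option (Int × Int)), (0 : Int))) = pvBestM ks kset from rfl, h]
  rcases bestScan_none_or_mem (fun p => pvNbrCount kset p.1 p.2) ks
      ((none : Option (Int × Int)), (0 : Int)) best h1 with h2 | h2
  · simp at h2
  · exact h2

lemma loopM_eq_B (fuel : Nat) (ks0 : List (Int × Int))
    (adj : PySem.Dict (Int × Int) (List (Int × Int)))
    (hadj : ∀ p ∈ ks0, adj.getD p [] = pvAdjOf (PySem.Set.ofList ks0) p) :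
    ∀ (alive : PySem.Set (Int × Int)) (deg : PySem.Dict (Int × Int) Int) (removed : Int),
      (∀ p ∈ ks0, deg.getD p 0 = pvCntL (ks0.filter (fun q => alive.contains q)) p) →
      pvLoopM fuel (ks0.filter (fun q => alive.contains q)) removed
        = pvLoopB fuel ks0 adj alive deg removed := by
  induction fuel with
  | zero => intro alive deg removed _; rfl
  | succ fuel ih =>
    intro alive deg removed hdeg
    have hscan := bestScan_eq_bestM ks0 alive deg hdeg
    cases hbest : pvBestScan ks0 alive deg with
    | mk ob c =>
    cases ob with
    | none =>
      have hM : pvBestM (ks0.filter (fun q => alive.contains q))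
          (PySem.Set.ofList (ks0.filter (fun q => alive.contains q))) = (none, c) := by
        rw [← hscan, hbest]
      have hMret : pvLoopM (fuel + 1) (ks0.filter (fun q => alive.contains q)) removed = removed := by
        simp only [pvLoopM, hM]
        split <;> rfl
      rw [hMret]
      simp [pvLoopB, hbest]
    | some best =>
      have hM : pvBestM (ks0.filter (fun q => alive.contains q))
          (PySem.Set.ofList (ks0.filter (fun q => alive.contains q))) = (some best, c) := by
        rw [← hscan, hbest]
      have hbal : best ∈ ks0.filter (fun q => alive.contains q) := bestM_mem _ _ hM
      have hb0 : best ∈ ks0 := List.mem_of_mem_filter hbal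
      have hne : (ks0.filter (fun q => alive.contains q)).isEmpty = false := by
        cases h : ks0.filter (fun q => alive.contains q) with
        | nil => rw [h] at hbal; simp at hbal
        | cons a l => rfl
      have hstepM : pvLoopM (fuel + 1) (ks0.filter (fun q => alive.contains q)) removed
          = pvLoopM fuel ((ks0.filter (fun q => alive.contains q)).filter (fun p => p ≠ best))
              (removed + 1) := by
        simp only [pvLoopM, hne, Bool.false_eq_true, if_false, hM]
      have hstepB : pvLoopB (fuel + 1) ks0 adj alive deg removed
          = pvLoopB fuel ks0 adj (PySem.Set.discard alive best)
              ((adj.getD best []).foldl (fun d q => d.modify q 0 (· - 1)) deg) (removed + 1) := by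
        simp only [pvLoopB, hbest]
      rw [hstepM, hstepB, ← alive_discard_filter ks0 alive best]
      refine ih (PySem.Set.discard alive best) _ (removed + 1) ?_
      intro p hp
      rw [getD_foldl_modify_sub_one, hdeg p hp, hadj best hb0,
        alive_discard_filter ks0 alive best, cntL_filter _ best p hbal]
      have hsym : ((p.1 - best.1, p.2 - best.2) ∈ pvDeltasB)
          ↔ ((best.1 - p.1, best.2 - p.2) ∈ pvDeltasB) := by
        constructor <;> intro h <;> simpa [neg_sub] using neg_delta_mem _ h
      have hcnt : (((pvAdjOf (PySem.Set.ofList ks0) best).count p : Nat) : Int)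
          = if (best.1 - p.1, best.2 - p.2) ∈ pvDeltasB then (1 : Int) else 0 := by
        by_cases hmem : p ∈ pvAdjOf (PySem.Set.ofList ks0) best
        · rw [List.count_eq_one_of_mem (nodup_adjOf ks0 best) hmem,
            if_pos (hsym.mp ((mem_adjOf ks0 best p).mp hmem).1)]
          norm_num
        · rw [List.count_eq_zero_of_not_mem hmem, if_neg]
          · norm_num
          · intro hin
            exact hmem ((mem_adjOf ks0 best p).mpr ⟨hsym.mpr hin, hp⟩)
      rw [hcnt]

lemma adjB_getD (ks : List (Int × Int)) (kset : PySem.Set (Int × Int)) (hnd : ks.Nodup)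
    (p : Int × Int) (hp : p ∈ ks) :
    (pvAdjB ks kset).getD p [] = pvAdjOf kset p := by
  have hitems : (pvAdjB ks kset).items
      = PySem.Dict.empty.items ++ ks.map (fun a => (a, pvAdjOf kset a)) := by
    exact PySem.Dict.items_foldl_insert_fresh ks (fun a => a) (fun a => pvAdjOf kset a)
      PySem.Dict.empty (fun a _ => PySem.Dict.contains_empty a) (by simpa using hnd)
  have hmem : (p, pvAdjOf kset p) ∈ (pvAdjB ks kset).items := by
    rw [hitems]
    simp only [List.mem_append, List.mem_map]
    exact Or.inr ⟨p, hp, rfl⟩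
  exact PySem.Dict.getD_of_mem_items _ hmem
    (PySem.Dict.nodup_keys_foldl_insert ks _ PySem.Dict.empty PySem.Dict.nodup_keys_empty) []

lemma degB_getD (ks : List (Int × Int)) (adj : PySem.Dict (Int × Int) (List (Int × Int)))
    (hnd : ks.Nodup) (p : Int × Int) (hp : p ∈ ks) :
    (pvDegB ks adj).getD p 0 = PySem.List.len (adj.getD p []) := by
  have hitems : (pvDegB ks adj).items
      = PySem.Dict.empty.items ++ ks.map (fun a => (a, PySem.List.len (adj.getD a []))) := by
    exact PySem.Dict.items_foldl_insert_fresh ks (fun a => a) (fun a => PySem.List.len (adj.getD a []))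
      PySem.Dict.empty (fun a _ => PySem.Dict.contains_empty a) (by simpa using hnd)
  have hmem : (p, PySem.List.len (adj.getD p [])) ∈ (pvDegB ks adj).items := by
    rw [hitems]
    simp only [List.mem_append, List.mem_map]
    exact Or.inr ⟨p, hp, rfl⟩
  exact PySem.Dict.getD_of_mem_items _ hmem
    (PySem.Dict.nodup_keys_foldl_insert ks _ PySem.Dict.empty PySem.Dict.nodup_keys_empty) 0

-- ===== VERDICT (by name: the statement is the Claim_ definition above) =====
theorem iterate_over_knights_spec : Claim_equal_iterate_over_knights := by
  intro arr _ _
  unfold Spec_iterate_over_knights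
  show pvLoopA ((get_knights arr).length + 1) arr 0
      = pvLoopB ((get_knights arr).length + 1) (get_knights arr)
          (pvAdjB (get_knights arr) (PySem.Set.ofList (get_knights arr)))
          (PySem.Set.ofList (get_knights arr))
          (pvDegB (get_knights arr) (pvAdjB (get_knights arr) (PySem.Set.ofList (get_knights arr)))) 0
  have hnd := nodup_get_knights arr
  have hfilter : (get_knights arr).filter
      (fun q => (PySem.Set.ofList (get_knights arr)).contains q) = get_knights arr := by
    rw [List.filter_eq_self]
    intro q hq
    rw [PySem.Set.contains_iff, PySem.Set.mem_ofList]
    exact hq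
  have hadj : ∀ p ∈ get_knights arr,
      (pvAdjB (get_knights arr) (PySem.Set.ofList (get_knights arr))).getD p []
        = pvAdjOf (PySem.Set.ofList (get_knights arr)) p :=
    fun p hp => adjB_getD _ _ hnd p hp
  have hdeg : ∀ p ∈ get_knights arr,
      (pvDegB (get_knights arr)
        (pvAdjB (get_knights arr) (PySem.Set.ofList (get_knights arr)))).getD p 0
        = pvCntL ((get_knights arr).filter
            (fun q => (PySem.Set.ofList (get_knights arr)).contains q)) p := by
    intro p hp
    rw [degB_getD _ _ hnd p hp, hadj p hp, PySem.List.len_eq, length_adjOf, hfilter]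
  have hmain := loopM_eq_B ((get_knights arr).length + 1) (get_knights arr)
    (pvAdjB (get_knights arr) (PySem.Set.ofList (get_knights arr))) hadj
    (PySem.Set.ofList (get_knights arr))
    (pvDegB (get_knights arr) (pvAdjB (get_knights arr) (PySem.Set.ofList (get_knights arr)))) 0 hdeg
  rw [loopA_eq_M, ← hmain, hfilter]
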